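-- pv_equiv track=rewrite | github.com/Baidicoot/prefill-evals | graders.py | parse_grader_prompt
-- ===== SOURCE A (Python) =====
-- from typing import Optional, Dict, Any, List
--
-- def parse_grader_prompt(content: str) -> Dict[str, Optional[str]]:
--     """
--     Parse a grader prompt file into system and user prompts.
--
--     Args:
--         content: Raw prompt content
--
--     Returns:
--         Dict with 'system' and 'user' keys
--     """
--     # Initialize result
--     result = {
--         "system": None,
--         "user": None
--     }
--
--     # Split by sections
--     lines = content.strip().split('\n')
--     current_section = None
--     current_content = []
--
--     headers = ["System:", "User:"]
--
--     for line in lines: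
--         # Check if this line is a section header
--         line_starts_with_header = any(line.strip().startswith(header) for header in headers)
--         if line_starts_with_header:
--             # Save previous section if exists
--             if current_section and current_content:
--                 content_text = '\n'.join(current_content).strip()
--                 if current_section == "System:":
--                     result["system"] = content_text
--                 elif current_section == "User:":
--                     result["user"] = content_text
--
--             # Start new section
--             current_section = next(header for header in headers if line.strip().startswith(header))
--             current_content = [line.strip()[len(current_section):].strip()]
--         else:
--             # Add line to current section
--             current_content.append(line)
--
--     # Don't forget the last section
--     if current_section and current_content:
--         content_text = '\n'.join(current_content).strip()
--         if current_section == "System:":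
--             result["system"] = content_text
--         elif current_section == "User:":
--             result["user"] = content_text
--
--     # If no headers found, treat entire content as user prompt
--     if result["system"] is None and result["user"] is None:
--         result["user"] = content.strip()
--
--     return result
-- ===== SOURCE B (Python) =====
-- def _header(line):
--     s = line.strip()
--     if s.startswith("System:"):
--         return ("system", s[len("System:"):].strip())
--     if s.startswith("User:"):
--         return ("user", s[len("User:"):].strip())
--     return None
--
--
-- def _sections(lines):
--     """Split the lines into (name, text) sections by header positions."""
--     out = []
--     n = len(lines)
--     i = 0
--     while i < n and _header(lines[i]) is None:  # discard pre-header lines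
--         i += 1
--     while i < n:
--         name, first = _header(lines[i])
--         j = i + 1
--         while j < n and _header(lines[j]) is None:
--             j += 1
--         out.append((name, '\n'.join([first] + lines[i + 1:j]).strip()))
--         i = j
--     return out
--
--
-- def parse_grader_prompt(content):
--     result = {"system": None, "user": None}
--     secs = _sections(content.strip().split('\n'))
--     for name, text in secs:
--         result[name] = text
--     if not secs:
--         result["user"] = content.strip()
--     return result
-- ===== Notes on version B (the rewrite author's own statement) =====
-- stated objective: simpler
-- what changed: A's single-pass state machine (save the pending section when the next header arrives and again after the loop, with duplicated save code) is replaced by a two-phase decomposition: first cut the line list into header-delimited (name, text) sections, then assign them into the result last-wins; the no-header fallback becomes a simple emptiness test.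
import Mathlib
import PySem

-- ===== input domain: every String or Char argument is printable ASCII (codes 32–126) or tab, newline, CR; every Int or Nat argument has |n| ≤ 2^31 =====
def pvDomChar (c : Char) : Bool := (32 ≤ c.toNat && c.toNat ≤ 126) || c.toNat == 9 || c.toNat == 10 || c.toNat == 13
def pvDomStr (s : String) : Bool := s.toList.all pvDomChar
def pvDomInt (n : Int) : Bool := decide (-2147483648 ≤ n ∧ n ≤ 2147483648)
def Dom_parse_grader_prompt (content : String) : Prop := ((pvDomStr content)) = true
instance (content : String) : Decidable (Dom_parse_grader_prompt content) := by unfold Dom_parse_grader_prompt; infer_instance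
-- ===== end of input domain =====

-- B replaces A's save-on-next-header state machine by a two-level scan that cuts the
-- line list into header-delimited sections and then assigns them last-wins (simpler).

-- ===== PORT A =====
-- save the accumulated section content into the result dict (A's two if/elif blocks)
def pvSaveA (d : PySem.Dict String (Option String)) (sec : String) (cc : List String) :
    PySem.Dict String (Option String) :=
  let t := PySem.Str.strip (PySem.Str.join "\n" cc)
  if sec = "System:" then d.insert "system" (some t)
  else if sec = "User:" then d.insert "user" (some t)
  else d

-- one iteration of A's for-loop; state = (result dict, current_section, current_content)
def pvStepA (st : PySem.Dict String (Option String) × Option String × List String)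
    (line : String) : PySem.Dict String (Option String) × Option String × List String :=
  let s := PySem.Str.strip line
  if PySem.Str.startswith s "System:" || PySem.Str.startswith s "User:" then
    let d' := match st.2.1 with
      | some sec => if st.2.2 = [] then st.1 else pvSaveA st.1 sec st.2.2
      | none => st.1
    let sec := if PySem.Str.startswith s "System:" then "System:" else "User:"
    (d', some sec, [PySem.Str.strip (PySem.Str.slice s (some (PySem.Str.len sec)) none)])
  else (st.1, st.2.1, st.2.2 ++ [line])

-- A's trailing "don't forget the last section" save
def pvFinA (st : PySem.Dict String (Option String) × Option String × List String) :
    PySem.Dict String (Option String) :=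
  match st.2.1 with
  | some sec => if st.2.2 = [] then st.1 else pvSaveA st.1 sec st.2.2
  | none => st.1

def parse_grader_prompt (content : String) : List (String × Option String) :=
  let init : PySem.Dict String (Option String) :=
    PySem.Dict.ofList [("system", none), ("user", none)]
  let lines := (PySem.Str.split? (PySem.Str.strip content) "\n").getD []  -- sep ≠ "", never the default
  let d2 := pvFinA (lines.foldl pvStepA (init, none, []))
  let d3 := if d2.getD "system" none = none ∧ d2.getD "user" none = none then
      d2.insert "user" (some (PySem.Str.strip content))
    else d2
  d3.items

-- ===== PORT B =====
-- Source B's _header: section name and stripped header-line remainder, or none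
def pvHeaderB (line : String) : Option (String × String) :=
  let s := PySem.Str.strip line
  if PySem.Str.startswith s "System:" then
    some ("system", PySem.Str.strip (PySem.Str.slice s (some 7) none))
  else if PySem.Str.startswith s "User:" then
    some ("user", PySem.Str.strip (PySem.Str.slice s (some 5) none))
  else none

-- Source B's _sections: skip pre-header lines, then cut a body at each header
def pvSections : List String → List (String × String)
  | [] => []
  | l :: ls =>
    match pvHeaderB l with
    | none => pvSections ls
    | some (name, first) =>
      let body := ls.takeWhile (fun x => (pvHeaderB x).isNone)
      let rest := ls.dropWhile (fun x => (pvHeaderB x).isNone)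
      (name, PySem.Str.strip (PySem.Str.join "\n" (first :: body))) :: pvSections rest
  termination_by ls => ls.length
  decreasing_by
    · simp
    · simp only [List.length_cons]
      exact Nat.lt_succ_of_le (List.length_dropWhile_le _ _)

def parse_grader_prompt_alt (content : String) : List (String × Option String) :=
  let secs := pvSections ((PySem.Str.split? (PySem.Str.strip content) "\n").getD [])
  let result := secs.foldl (fun d p => d.insert p.1 (some p.2))
    (PySem.Dict.ofList [("system", none), ("user", none)])
  if secs.isEmpty then (result.insert "user" (some (PySem.Str.strip content))).items
  else result.items

-- ===== PRECONDITION & SPEC =====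
def Spec_parse_grader_prompt (content : String) (out : List (String × Option String)) : Prop := out = parse_grader_prompt_alt content
instance (content : String) (out : List (String × Option String)) : Decidable (Spec_parse_grader_prompt content out) := by unfold Spec_parse_grader_prompt; infer_instance

-- ===== CLAIM (what is proved, stated in full; the proofs are below) =====
def Claim_equal_parse_grader_prompt : Prop := ∀ (content : String), Dom_parse_grader_prompt content → Spec_parse_grader_prompt content (parse_grader_prompt content)

-- ===== LEMMAS AND PROOFS =====

def pvIns (d : PySem.Dict String (Option String)) (p : String × String) :
    PySem.Dict String (Option String) := d.insert p.1 (some p.2)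

theorem pvLen7 : PySem.Str.len "System:" = 7 := by decide
theorem pvLen5 : PySem.Str.len "User:" = 5 := by decide

theorem pvHeaderB_sys (x : String)
    (h : PySem.Str.startswith (PySem.Str.strip x) "System:" = true) :
    pvHeaderB x = some ("system",
      PySem.Str.strip (PySem.Str.slice (PySem.Str.strip x) (some 7) none)) := by
  unfold pvHeaderB; simp only [h, if_true]

theorem pvHeaderB_user (x : String)
    (h1 : PySem.Str.startswith (PySem.Str.strip x) "System:" = false)
    (h2 : PySem.Str.startswith (PySem.Str.strip x) "User:" = true) :
    pvHeaderB x = some ("user",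
      PySem.Str.strip (PySem.Str.slice (PySem.Str.strip x) (some 5) none)) := by
  unfold pvHeaderB
  simp only [h1, h2, Bool.false_eq_true, if_false, if_true]

theorem pvHeaderB_none (x : String)
    (h1 : PySem.Str.startswith (PySem.Str.strip x) "System:" = false)
    (h2 : PySem.Str.startswith (PySem.Str.strip x) "User:" = false) :
    pvHeaderB x = none := by
  unfold pvHeaderB
  simp only [h1, h2, Bool.false_eq_true, if_false]

theorem pvStepA_sys (st : PySem.Dict String (Option String) × Option String × List String)
    (x : String) (h : PySem.Str.startswith (PySem.Str.strip x) "System:" = true) :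
    pvStepA st x = (pvFinA st, some "System:",
      [PySem.Str.strip (PySem.Str.slice (PySem.Str.strip x) (some 7) none)]) := by
  unfold pvStepA pvFinA
  simp only [h, Bool.true_or, if_true, pvLen7]

theorem pvStepA_user (st : PySem.Dict String (Option String) × Option String × List String)
    (x : String)
    (h1 : PySem.Str.startswith (PySem.Str.strip x) "System:" = false)
    (h2 : PySem.Str.startswith (PySem.Str.strip x) "User:" = true) :
    pvStepA st x = (pvFinA st, some "User:",
      [PySem.Str.strip (PySem.Str.slice (PySem.Str.strip x) (some 5) none)]) := by
  unfold pvStepA pvFinA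
  simp only [h1, h2, Bool.false_or, if_true, Bool.false_eq_true, if_false,
    pvLen5]

theorem pvStepA_none (st : PySem.Dict String (Option String) × Option String × List String)
    (x : String)
    (h1 : PySem.Str.startswith (PySem.Str.strip x) "System:" = false)
    (h2 : PySem.Str.startswith (PySem.Str.strip x) "User:" = false) :
    pvStepA st x = (st.1, st.2.1, st.2.2 ++ [x]) := by
  unfold pvStepA
  simp only [h1, h2, Bool.or_self, Bool.false_eq_true, if_false]

theorem pvSaveA_sys (d : PySem.Dict String (Option String)) (cc : List String) :
    pvSaveA d "System:" cc =
      pvIns d ("system", PySem.Str.strip (PySem.Str.join "\n" cc)) := by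
  simp [pvSaveA, pvIns]

theorem pvSaveA_user (d : PySem.Dict String (Option String)) (cc : List String) :
    pvSaveA d "User:" cc =
      pvIns d ("user", PySem.Str.strip (PySem.Str.join "\n" cc)) := by
  simp [pvSaveA, pvIns]

theorem pvFinA_some (d : PySem.Dict String (Option String)) (sec : String)
    (cc : List String) (hcc : cc ≠ []) :
    pvFinA (d, some sec, cc) = pvSaveA d sec cc := by
  simp [pvFinA, hcc]

-- A's section phase: from a live section, the loop result is B's sections folded in
theorem pvAux (ls : List String) : ∀ (d : PySem.Dict String (Option String))
    (sec : String) (cc : List String), (sec = "System:" ∨ sec = "User:") → cc ≠ [] →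
    pvFinA (ls.foldl pvStepA (d, some sec, cc)) =
      (pvSections (ls.dropWhile (fun x => (pvHeaderB x).isNone))).foldl pvIns
        (pvSaveA d sec (cc ++ ls.takeWhile (fun x => (pvHeaderB x).isNone))) := by
  induction ls with
  | nil =>
    intro d sec cc hsec hcc
    simp only [List.foldl_nil, List.dropWhile_nil, List.takeWhile_nil, List.append_nil]
    rw [pvSections, pvFinA_some _ _ _ hcc, List.foldl_nil]
  | cons x xs ih =>
    intro d sec cc hsec hcc
    by_cases hS : PySem.Str.startswith (PySem.Str.strip x) "System:" = true
    · have hdr := pvHeaderB_sys x hS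
      rw [List.dropWhile_cons_of_neg (by simp [hdr]),
          List.takeWhile_cons_of_neg (by simp [hdr]), pvSections]
      simp only [hdr, List.foldl_cons, List.append_nil]
      rw [pvStepA_sys _ _ hS, pvFinA_some _ _ _ hcc,
          ih _ _ _ (Or.inl rfl) (by simp), pvSaveA_sys]
      rfl
    · have hS' : PySem.Str.startswith (PySem.Str.strip x) "System:" = false := by
        cases h : PySem.Str.startswith (PySem.Str.strip x) "System:"
        · rfl
        · exact absurd h hS
      by_cases hU : PySem.Str.startswith (PySem.Str.strip x) "User:" = true
      · have hdr := pvHeaderB_user x hS' hU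
        rw [List.dropWhile_cons_of_neg (by simp [hdr]),
            List.takeWhile_cons_of_neg (by simp [hdr]), pvSections]
        simp only [hdr, List.foldl_cons, List.append_nil]
        rw [pvStepA_user _ _ hS' hU, pvFinA_some _ _ _ hcc,
            ih _ _ _ (Or.inr rfl) (by simp), pvSaveA_user]
        rfl
      · have hU' : PySem.Str.startswith (PySem.Str.strip x) "User:" = false := by
          cases h : PySem.Str.startswith (PySem.Str.strip x) "User:"
          · rfl
          · exact absurd h hU
        have hdr := pvHeaderB_none x hS' hU'
        rw [List.dropWhile_cons_of_pos (by simp [hdr]),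
            List.takeWhile_cons_of_pos (by simp [hdr])]
        rw [List.foldl_cons, pvStepA_none _ _ hS' hU']
        rw [ih _ _ _ hsec (by simp)]
        simp

-- A's loop from the no-section state computes B's sections folded into d
theorem pvMain (lines : List String) : ∀ (d : PySem.Dict String (Option String))
    (cc : List String),
    pvFinA (lines.foldl pvStepA (d, none, cc)) = (pvSections lines).foldl pvIns d := by
  induction lines with
  | nil => intro d cc; rw [List.foldl_nil, pvSections, List.foldl_nil]; rfl
  | cons l ls ih =>
    intro d cc
    by_cases hS : PySem.Str.startswith (PySem.Str.strip l) "System:" = true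
    · have hdr := pvHeaderB_sys l hS
      rw [pvSections]
      simp only [hdr, List.foldl_cons]
      rw [pvStepA_sys _ _ hS, pvAux _ _ _ _ (Or.inl rfl) (by simp), pvSaveA_sys]
      rfl
    · have hS' : PySem.Str.startswith (PySem.Str.strip l) "System:" = false := by
        cases h : PySem.Str.startswith (PySem.Str.strip l) "System:"
        · rfl
        · exact absurd h hS
      by_cases hU : PySem.Str.startswith (PySem.Str.strip l) "User:" = true
      · have hdr := pvHeaderB_user l hS' hU
        rw [pvSections]
        simp only [hdr, List.foldl_cons]
        rw [pvStepA_user _ _ hS' hU, pvAux _ _ _ _ (Or.inr rfl) (by simp), pvSaveA_user]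
        rfl
      · have hU' : PySem.Str.startswith (PySem.Str.strip l) "User:" = false := by
          cases h : PySem.Str.startswith (PySem.Str.strip l) "User:"
          · rfl
          · exact absurd h hU
        have hdr := pvHeaderB_none l hS' hU'
        rw [pvSections]
        simp only [hdr]
        rw [List.foldl_cons, pvStepA_none _ _ hS' hU']
        exact ih d (cc ++ [l])

-- every section name produced by B is "system" or "user"
theorem pvSections_names (lines : List String) :
    ∀ q ∈ pvSections lines, q.1 = "system" ∨ q.1 = "user" := by
  induction lines using pvSections.induct with
  | case1 => rw [pvSections]; simp
  | case2 l ls hdr ih =>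
    rw [pvSections]; simpa [hdr] using ih
  | case3 l ls name first hdr body ih =>
    rw [pvSections]
    simp only [hdr]
    intro q hq
    rcases List.mem_cons.mp hq with h | h
    · subst h
      have hname : name = "system" ∨ name = "user" := by
        by_cases hS : PySem.Str.startswith (PySem.Str.strip l) "System:" = true
        · rw [pvHeaderB_sys l hS] at hdr
          exact Or.inl (congrArg Prod.fst (Option.some.inj hdr)).symm
        · have hS' : PySem.Str.startswith (PySem.Str.strip l) "System:" = false := by
            cases h' : PySem.Str.startswith (PySem.Str.strip l) "System:"
            · rfl
            · exact absurd h' hS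
          by_cases hU : PySem.Str.startswith (PySem.Str.strip l) "User:" = true
          · rw [pvHeaderB_user l hS' hU] at hdr
            exact Or.inr (congrArg Prod.fst (Option.some.inj hdr)).symm
          · have hU' : PySem.Str.startswith (PySem.Str.strip l) "User:" = false := by
              cases h' : PySem.Str.startswith (PySem.Str.strip l) "User:"
              · rfl
              · exact absurd h' hU
            rw [pvHeaderB_none l hS' hU'] at hdr
            exact absurd hdr (by simp)
      simpa using hname
    · exact ih q h

-- if any section exists, folding it in leaves at least one key non-none
theorem pvNotBothNone (secs : List (String × String)) :
    ∀ (d : PySem.Dict String (Option String)),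
    (∀ q ∈ secs, q.1 = "system" ∨ q.1 = "user") → secs ≠ [] →
    ¬((secs.foldl pvIns d).getD "system" none = none ∧
      (secs.foldl pvIns d).getD "user" none = none) := by
  induction secs with
  | nil => intro _ _ h; exact absurd rfl h
  | cons q rest ih =>
    intro d hnames _
    cases rest with
    | nil =>
      simp only [List.foldl_cons, List.foldl_nil]
      rcases hnames q (by simp) with h | h <;>
        · rintro ⟨h1, h2⟩
          simp [pvIns, h, PySem.Dict.getD_insert] at h1 h2
    | cons r rs =>
      exact ih (pvIns d q) (fun p hp => hnames p (by simp [hp])) (by simp)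

-- ===== VERDICT (by name: the statement is the Claim_ definition above) =====
theorem parse_grader_prompt_spec : Claim_equal_parse_grader_prompt := by
  intro content _
  unfold Spec_parse_grader_prompt parse_grader_prompt parse_grader_prompt_alt
  dsimp only
  rw [pvMain]
  cases hsecs : pvSections ((PySem.Str.split? (PySem.Str.strip content) "\n").getD []) with
  | nil =>
    have hboth : (List.foldl pvIns
        (PySem.Dict.ofList [("system", none), ("user", none)]) []).getD "system" none = none ∧
        (List.foldl pvIns
        (PySem.Dict.ofList [("system", none), ("user", none)]) []).getD "user" none = none := by
      decide
    rw [if_pos hboth]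
    simp
  | cons s ss =>
    have hnames := pvSections_names ((PySem.Str.split? (PySem.Str.strip content) "\n").getD [])
    rw [hsecs] at hnames
    have hnb := pvNotBothNone (s :: ss)
      (PySem.Dict.ofList [("system", none), ("user", none)]) hnames (by simp)
    rw [if_neg hnb]
    simp only [List.isEmpty_cons, Bool.false_eq_true, if_false]
    rfl
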